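-- pv_equiv track=rewrite | github.com/suriya4code/dsa_algo | 1_Interview_Problems/christmas_tree_triplet.py | christ
-- ===== SOURCE A (Python) =====
-- import math
--
-- def christ(A,B):
--     N = len(A)
--     if N < 3:
--         return -1
--     min_val = math.inf
--     for i in range(1,N-1):
--         left_min = math.inf
--         right_min = math.inf
--         for j in range(i):
--             if A[j]< A[i] and B[j]<left_min:
--                 left_min = B[j]
--         for k in range(i+1,N):
--             if A[k]> A[i] and B[k]<right_min:
--                 right_min = B[k]
--         min_val = min(min_val, (left_min+B[i]+ right_min))
--     return -1 if min_val== math.inf else min_val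
-- ===== SOURCE B (Python) =====
-- import math
--
-- # Two sweep passes over a Pareto front of (key, minB) pairs kept sorted by key with
-- # strictly decreasing minB; binary search locates, dominated pairs are spliced out.
--
-- def _bisect(front, x):
--     lo, hi = 0, len(front)
--     while lo < hi:
--         mid = (lo + hi) // 2
--         if front[mid][0] < x:
--             lo = mid + 1
--         else:
--             hi = mid
--     return lo
--
-- def _insert(front, a, b):
--     n = len(front)
--     i = _bisect(front, a)
--     if i > 0 and front[i - 1][1] <= b:
--         return                      # dominated by the predecessor (min B among keys < a)
--     if i < n and front[i][0] == a and front[i][1] <= b: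
--         return                      # dominated by the equal-key pair
--     j = i
--     while j < n and front[j][1] >= b:
--         j += 1                      # these pairs are dominated by (a, b)
--     front[i:j] = [(a, b)]
--
-- def _query(front, x):
--     # min B over pairs with key < x: minB decreases along the front, so take the last such pair
--     i = _bisect(front, x)
--     return front[i - 1][1] if i > 0 else math.inf
--
-- def christ(A, B):
--     N = len(A)
--     if N < 3:
--         return -1
--     lefts = []
--     front = []
--     for i in range(N):
--         lefts.append(_query(front, A[i]))
--         _insert(front, A[i], B[i])
--     rights = []
--     front = []
--     for i in range(N - 1, -1, -1):
--         rights.append(_query(front, -A[i]))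
--         _insert(front, -A[i], B[i])
--     rights.reverse()
--     best = math.inf
--     for i in range(1, N - 1):
--         cand = lefts[i] + B[i] + rights[i]
--         if cand < best:
--             best = cand
--     return -1 if best == math.inf else best
-- ===== Notes on version B (the rewrite author's own statement) =====
-- stated objective: faster
-- what changed: A's per-middle-element pair of linear scans is replaced by two sweep passes over a Pareto front of (key, min-B) pairs kept sorted by key, located by binary search, with dominated pairs spliced out, so each element is queried and inserted once instead of rescanning the whole list for every i.
-- outside the precondition, e.g. on christ([0, 0, -1], [-1, 0]): A returns -1, B raises IndexError
import Mathlib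
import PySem

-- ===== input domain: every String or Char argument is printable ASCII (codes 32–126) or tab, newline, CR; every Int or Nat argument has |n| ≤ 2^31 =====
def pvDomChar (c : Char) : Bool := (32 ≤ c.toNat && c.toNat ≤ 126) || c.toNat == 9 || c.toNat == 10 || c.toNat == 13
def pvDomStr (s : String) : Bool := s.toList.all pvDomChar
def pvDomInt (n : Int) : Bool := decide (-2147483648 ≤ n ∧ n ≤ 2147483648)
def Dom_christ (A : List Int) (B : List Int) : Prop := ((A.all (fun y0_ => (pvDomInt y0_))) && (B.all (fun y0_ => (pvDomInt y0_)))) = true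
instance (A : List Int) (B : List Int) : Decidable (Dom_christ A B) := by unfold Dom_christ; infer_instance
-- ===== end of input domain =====

-- B replaces A's per-middle-element double scan by two Pareto-front sweeps (measured much
-- faster); return values are proved equal whenever A returns (len(B) ≥ len(A) or len(A) < 3).

-- shared model of Python's math.inf: Option Int with none = +inf (used by both ports)
def oltO : Option Int → Option Int → Bool
  | none, _ => false
  | some _, none => true
  | some v, some w => decide (v < w)

def omin (acc c : Option Int) : Option Int := if oltO c acc then c else acc

def oadd3 : Option Int → Int → Option Int → Option Int
  | some l, v, some r => some (l + v + r)
  | _, _, _ => none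

-- ===== PORT A =====
def christ (A : List Int) (B : List Int) : Int :=
  let N : Int := PySem.List.len A
  if N < 3 then -1
  else
    let min_val :=
      (PySem.List.pyRange 1 (N - 1) 1).foldl (fun mv i =>
        let Ai := PySem.List.pyGetD A i 0
        let left_min :=
          (PySem.List.pyRange 0 i 1).foldl (fun lm j =>
            if PySem.List.pyGetD A j 0 < Ai ∧ oltO (some (PySem.List.pyGetD B j 0)) lm
            then some (PySem.List.pyGetD B j 0) else lm) none
        let right_min :=
          (PySem.List.pyRange (i + 1) N 1).foldl (fun rm k =>
            if Ai < PySem.List.pyGetD A k 0 ∧ oltO (some (PySem.List.pyGetD B k 0)) rm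
            then some (PySem.List.pyGetD B k 0) else rm) none
        omin mv (oadd3 left_min (PySem.List.pyGetD B i 0) right_min)) none
    match min_val with
    | none => -1
    | some v => v

-- ===== PORT B =====
-- Source B keeps the front in a Python list it mutates in place (front[i:j] = [(a,b)]);
-- the port is value-level: each helper returns the list value the mutation leaves behind.
-- hand-written binary search of Source B (_bisect), exact port of the while loop
def bisectF (front : List (Int × Int)) (x : Int) (lo hi : Int) : Int :=
  if h : lo < hi then
    let mid := PySem.Int.floordiv (lo + hi) 2
    if (PySem.List.pyGetD front mid (0, 0)).1 < x then bisectF front x (mid + 1) hi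
    else bisectF front x lo mid
  else lo
termination_by (hi - lo).toNat
decreasing_by
  · have h1 := PySem.Int.floordiv_two_mid_bounds (le_of_lt h)
    omega
  · have h1 := PySem.Int.floordiv_two_mid_bounds (le_of_lt h)
    have h2 : PySem.Int.floordiv (lo + hi) 2 < hi :=
      (PySem.Int.floordiv_lt_iff_lt_mul (by norm_num)).mpr (by omega)
    omega

-- Source B's pop loop in _insert ('while j < n and front[j][1] >= b: j += 1')
def popScan (front : List (Int × Int)) (b : Int) (j n : Int) : Int :=
  if h : j < n then
    if b ≤ (PySem.List.pyGetD front j (0, 0)).2 then popScan front b (j + 1) n else j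
  else j
termination_by (n - j).toNat
decreasing_by omega

def insFront (front : List (Int × Int)) (a b : Int) : List (Int × Int) :=
  let n := PySem.List.len front
  let i := bisectF front a 0 n
  if 0 < i ∧ (PySem.List.pyGetD front (i - 1) (0, 0)).2 ≤ b then front
  else if i < n ∧ (PySem.List.pyGetD front i (0, 0)).1 = a ∧
      (PySem.List.pyGetD front i (0, 0)).2 ≤ b then front
  else
    let j := popScan front b i n
    PySem.List.slice front none (some i) ++ (a, b) :: PySem.List.slice front (some j) none

def qfront (front : List (Int × Int)) (x : Int) : Option Int :=
  let i := bisectF front x 0 (PySem.List.len front)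
  if 0 < i then some (PySem.List.pyGetD front (i - 1) (0, 0)).2 else none

def christ_alt (A : List Int) (B : List Int) : Int :=
  let N : Int := PySem.List.len A
  if N < 3 then -1
  else
    let lefts := ((PySem.List.pyRange 0 N 1).foldl (fun s i =>
        (s.1 ++ [qfront s.2 (PySem.List.pyGetD A i 0)],
         insFront s.2 (PySem.List.pyGetD A i 0) (PySem.List.pyGetD B i 0)))
        (([] : List (Option Int)), ([] : List (Int × Int)))).1
    let rights := (((PySem.List.pyRange (N - 1) (-1) (-1)).foldl (fun s i =>
        (s.1 ++ [qfront s.2 (-PySem.List.pyGetD A i 0)],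
         insFront s.2 (-PySem.List.pyGetD A i 0) (PySem.List.pyGetD B i 0)))
        (([] : List (Option Int)), ([] : List (Int × Int)))).1).reverse
    let best :=
      (PySem.List.pyRange 1 (N - 1) 1).foldl (fun best i =>
        let cand := oadd3 (PySem.List.pyGetD lefts i none) (PySem.List.pyGetD B i 0)
                          (PySem.List.pyGetD rights i none)
        if oltO cand best then cand else best) none
    match best with
    | none => -1
    | some v => v

-- ===== PRECONDITION & SPEC =====
-- Pre_ excludes inputs with len(B) < len(A) and len(A) ≥ 3: there A's short-circuit comparisons may
-- or may not reach the missing B entries (A raises IndexError on most such inputs, returns on a few),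
-- while B reads every B[i] and raises.
def Pre_christ (A : List Int) (B : List Int) : Prop := A.length < 3 ∨ A.length ≤ B.length
instance (A : List Int) (B : List Int) : Decidable (Pre_christ A B) := by unfold Pre_christ; infer_instance

def pvWitness_christ : List Int × List Int := ([0, 1, 2], [5, 4, 3])

def Spec_christ (A : List Int) (B : List Int) (out : Int) : Prop := out = christ_alt A B
instance (A : List Int) (B : List Int) (out : Int) : Decidable (Spec_christ A B out) := by unfold Spec_christ; infer_instance

-- ===== CLAIM (what is proved, stated in full; the proofs are below) =====
def Claim_equal_christ : Prop := ∀ (A : List Int) (B : List Int), Dom_christ A B → Pre_christ A B → Spec_christ A B (christ A B)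

-- ===== LEMMAS AND PROOFS =====

-- proof-side model of a front query: the linear minimum fold (same shape as A's inner loops)
def mfront (fr : List (Int × Int)) (x : Int) : Option Int :=
  fr.foldl (fun res p => if p.1 < x ∧ oltO (some p.2) res then some p.2 else res) none

-- proof-side recursive model of Source B's _insert (shown equal to insFront on sorted fronts)
def insRec : List (Int × Int) → Int → Int → List (Int × Int)
  | [], a, b => [(a, b)]
  | p :: rest, a, b =>
    if p.1 < a then
      if p.2 ≤ b then p :: rest
      else p :: insRec rest a b
    else if p.1 = a ∧ p.2 ≤ b then p :: rest
    else (a, b) :: (p :: rest).dropWhile (fun q => decide (b ≤ q.2))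

def contrib (x : Int) (p : Int × Int) : Option Int := if p.1 < x then some p.2 else none

lemma omin_none_left (c : Option Int) : omin none c = c := by
  cases c <;> simp [omin, oltO]

lemma omin_none_right (c : Option Int) : omin c none = c := by
  cases c <;> simp [omin, oltO]

lemma omin_comm (a b : Option Int) : omin a b = omin b a := by
  cases a <;> cases b <;> simp only [omin, oltO] <;> split_ifs <;> simp_all <;> omega

lemma omin_assoc (a b c : Option Int) : omin (omin a b) c = omin a (omin b c) := by
  cases a <;> cases b <;> cases c <;> simp only [omin, oltO] <;> split_ifs <;> simp_all <;> omega

lemma mfront_fold (l : List (Int × Int)) (x : Int) (acc : Option Int) :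
    l.foldl (fun res p => if p.1 < x ∧ oltO (some p.2) res then some p.2 else res) acc
      = omin acc (mfront l x) := by
  induction l generalizing acc with
  | nil => simp [mfront, omin_none_right]
  | cons p l ih =>
    have hstep : ∀ (r : Option Int),
        (if p.1 < x ∧ oltO (some p.2) r then some p.2 else r) = omin r (contrib x p) := by
      intro r
      by_cases h : p.1 < x
      · simp [contrib, h, omin]
      · simp [contrib, h, omin_none_right]
    have hq : mfront (p :: l) x = omin (contrib x p) (mfront l x) := by
      show List.foldl _ (if p.1 < x ∧ oltO (some p.2) none then some p.2 else none) l = _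
      rw [hstep, omin_none_left, ih]
    simp only [List.foldl_cons]
    rw [hstep, ih, hq, omin_assoc]

lemma mfront_nil (x : Int) : mfront [] x = none := rfl

lemma mfront_cons (p : Int × Int) (l : List (Int × Int)) (x : Int) :
    mfront (p :: l) x = omin (contrib x p) (mfront l x) := by
  show List.foldl _ (if p.1 < x ∧ oltO (some p.2) none then some p.2 else none) l = _
  have hstep : (if p.1 < x ∧ oltO (some p.2) (none : Option Int) then some p.2 else none)
      = contrib x p := by
    by_cases h : p.1 < x <;> simp [contrib, h, oltO]
  rw [hstep, mfront_fold]

lemma mfront_append (l₁ l₂ : List (Int × Int)) (x : Int) :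
    mfront (l₁ ++ l₂) x = omin (mfront l₁ x) (mfront l₂ x) := by
  show List.foldl _ none (l₁ ++ l₂) = _
  rw [List.foldl_append]
  exact mfront_fold l₂ x _

lemma mfront_singleton (p : Int × Int) (x : Int) : mfront [p] x = contrib x p := by
  rw [mfront_cons, mfront_nil, omin_none_right]

lemma mfront_reverse (l : List (Int × Int)) (x : Int) :
    mfront l.reverse x = mfront l x := by
  induction l with
  | nil => rfl
  | cons p l ih =>
    rw [List.reverse_cons, mfront_append, mfront_singleton, ih, mfront_cons, omin_comm]

lemma mfront_le_mem (l : List (Int × Int)) (x : Int) (q : Int × Int)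
    (hq : q ∈ l) (hx : q.1 < x) : ∃ m, mfront l x = some m ∧ m ≤ q.2 := by
  induction l with
  | nil => cases hq
  | cons r l ih =>
    rw [mfront_cons]
    rcases List.mem_cons.mp hq with h | h
    · subst h
      have hc : contrib x q = some q.2 := by simp [contrib, hx]
      rw [hc]
      cases hqf : mfront l x with
      | none => exact ⟨q.2, by simp [omin, oltO], le_refl _⟩
      | some w =>
        by_cases hw : w < q.2
        · exact ⟨w, by simp [omin, oltO, hw], le_of_lt hw⟩
        · exact ⟨q.2, by simp [omin, oltO, hw], le_refl _⟩
    · obtain ⟨m, hm, hle⟩ := ih h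
      rw [hm]
      cases hc : contrib x r with
      | none => exact ⟨m, by simp [omin, oltO], hle⟩
      | some b' =>
        by_cases hw : m < b'
        · exact ⟨m, by simp [omin, oltO, hw], hle⟩
        · exact ⟨b', by simp [omin, oltO, hw], le_trans (by omega) hle⟩

-- (a,b) adds nothing when some member of l dominates it
lemma dom_absorb (l : List (Int × Int)) (x a b : Int) (q : Int × Int)
    (hq : q ∈ l) (h1 : q.1 ≤ a) (h2 : q.2 ≤ b) :
    omin (mfront l x) (contrib x (a, b)) = mfront l x := by
  by_cases hax : a < x
  · obtain ⟨m, hm, hle⟩ := mfront_le_mem l x q hq (lt_of_le_of_lt h1 hax)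
    have hmb : ¬ b < m := by omega
    rw [hm]
    simp [contrib, hax, omin, oltO, hmb]
  · simp [contrib, hax, omin_none_right]

lemma omin_absorb_single (x a b : Int) (q : Int × Int) (h1 : a ≤ q.1) (h2 : b ≤ q.2) :
    omin (contrib x (a, b)) (contrib x q) = contrib x (a, b) := by
  by_cases hqx : q.1 < x
  · have hax : a < x := lt_of_le_of_lt h1 hqx
    have hqb : ¬ q.2 < b := by omega
    simp [contrib, hqx, hax, omin, oltO, hqb]
  · simp [contrib, hqx, omin_none_right]

-- pairs dominated by (a,b) can be dropped next to its contribution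
lemma absorb_take (t : List (Int × Int)) (x a b : Int)
    (h : ∀ q ∈ t, a ≤ q.1 ∧ b ≤ q.2) :
    omin (contrib x (a, b)) (mfront t x) = contrib x (a, b) := by
  induction t with
  | nil => rw [mfront_nil, omin_none_right]
  | cons q t ih =>
    rw [mfront_cons, ← omin_assoc,
      omin_absorb_single x a b q (h q List.mem_cons_self).1 (h q List.mem_cons_self).2,
      ih (fun r hr => h r (List.mem_cons_of_mem q hr))]

def Good (fr : List (Int × Int)) : Prop :=
  fr.Pairwise (fun p q => p.1 < q.1 ∧ q.2 < p.2)

lemma mem_insRec (fr : List (Int × Int)) (a b : Int) (q : Int × Int)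
    (hq : q ∈ insRec fr a b) : q ∈ fr ∨ q = (a, b) := by
  induction fr with
  | nil => simp only [insRec, List.mem_singleton] at hq; exact Or.inr hq
  | cons p rest ih =>
    rw [insRec] at hq
    split_ifs at hq with h1 h2 h3
    · exact Or.inl hq
    · rcases List.mem_cons.mp hq with h | h
      · exact Or.inl (List.mem_cons.mpr (Or.inl h))
      · rcases ih h with h' | h'
        · exact Or.inl (List.mem_cons.mpr (Or.inr h'))
        · exact Or.inr h'
    · exact Or.inl hq
    · rcases List.mem_cons.mp hq with h | h
      · exact Or.inr h
      · exact Or.inl ((List.dropWhile_sublist _).subset h)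

lemma dropWhile_snd_lt (fr : List (Int × Int)) (b : Int) (hG : Good fr) :
    ∀ q ∈ fr.dropWhile (fun q => decide (b ≤ q.2)), q.2 < b := by
  induction fr with
  | nil => intro q hq; simp at hq
  | cons p rest ih =>
    intro q hq
    rw [List.dropWhile_cons] at hq
    split_ifs at hq with hp
    · exact ih (List.pairwise_cons.mp hG).2 q hq
    · simp only [decide_eq_true_eq, not_le] at hp
      rcases List.mem_cons.mp hq with h | h
      · subst h; exact hp
      · exact lt_trans ((List.pairwise_cons.mp hG).1 q h).2 hp

lemma ins_good (fr : List (Int × Int)) (a b : Int) (hG : Good fr) :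
    Good (insRec fr a b) := by
  induction fr with
  | nil => simp [insRec, Good]
  | cons p rest ih =>
    rw [insRec]
    obtain ⟨hp, hrest⟩ := List.pairwise_cons.mp hG
    split_ifs with h1 h2 h3
    · exact hG
    · refine List.pairwise_cons.mpr ⟨?_, ih hrest⟩
      intro q hq
      rcases mem_insRec rest a b q hq with h' | h'
      · exact hp q h'
      · subst h'; exact ⟨h1, by omega⟩
    · exact hG
    · refine List.pairwise_cons.mpr ⟨?_, List.Pairwise.sublist (List.dropWhile_sublist _) hG⟩
      intro q hq
      refine ⟨?_, dropWhile_snd_lt (p :: rest) b hG q hq⟩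
      have hq' := (List.dropWhile_sublist _).subset hq
      have hap : a ≤ p.1 := by omega
      rcases List.mem_cons.mp hq' with h' | h'
      · rw [h']
        rcases lt_or_eq_of_le hap with h'' | h''
        · exact h''
        · exfalso
          have hlt := dropWhile_snd_lt (p :: rest) b hG q hq
          rw [h'] at hlt
          exact h3 ⟨h''.symm, by omega⟩
      · exact lt_of_le_of_lt hap (hp q h').1

lemma ins_qf (fr : List (Int × Int)) (a b : Int) (hG : Good fr) (x : Int) :
    mfront (insRec fr a b) x = omin (mfront fr x) (contrib x (a, b)) := by
  induction fr with
  | nil => rw [mfront_nil, omin_none_left]; exact mfront_singleton _ _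
  | cons p rest ih =>
    rw [insRec]
    obtain ⟨hp, hrest⟩ := List.pairwise_cons.mp hG
    split_ifs with h1 h2 h3
    · exact (dom_absorb (p :: rest) x a b p List.mem_cons_self (le_of_lt h1) h2).symm
    · rw [mfront_cons, ih hrest, ← omin_assoc, ← mfront_cons]
    · exact (dom_absorb (p :: rest) x a b p List.mem_cons_self (le_of_eq h3.1) h3.2).symm
    · rw [mfront_cons]
      have habs : omin (contrib x (a, b))
          (mfront ((p :: rest).takeWhile (fun q => decide (b ≤ q.2))) x)
          = contrib x (a, b) := by
        refine absorb_take _ x a b ?_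
        intro q hq
        have hmem := (List.takeWhile_sublist _).subset hq
        have hb : b ≤ q.2 := by simpa using List.mem_takeWhile_imp hq
        have hap : a ≤ p.1 := by omega
        rcases List.mem_cons.mp hmem with h' | h'
        · subst h'; exact ⟨hap, hb⟩
        · exact ⟨le_of_lt (lt_of_le_of_lt hap (hp q h').1), hb⟩
      conv_rhs => rw [show p :: rest
          = (p :: rest).takeWhile (fun q => decide (b ≤ q.2))
            ++ (p :: rest).dropWhile (fun q => decide (b ≤ q.2)) from
          (List.takeWhile_append_dropWhile).symm]
      rw [mfront_append, omin_comm _ (contrib x (a, b)), ← omin_assoc, habs]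

-- generic prefix facts about takeWhile (stated here because no library lemma matches)
lemma takeWhile_len_le {α : Type} (l : List α) (p : α → Bool) :
    (l.takeWhile p).length ≤ l.length :=
  (List.takeWhile_prefix p).length_le

lemma takeWhile_prop_of_lt {α : Type} (l : List α) (p : α → Bool) (k : Nat)
    (hk : k < (l.takeWhile p).length) (hk2 : k < l.length) : p l[k] = true := by
  have h1 : (l.takeWhile p)[k] = l[k] := (List.takeWhile_prefix p).getElem hk
  rw [← h1]
  exact List.mem_takeWhile_imp (List.getElem_mem hk)

lemma takeWhile_boundary {α : Type} (l : List α) (p : α → Bool)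
    (h : (l.takeWhile p).length < l.length) : p l[(l.takeWhile p).length] = false := by
  induction l with
  | nil => simp at h
  | cons a l ih =>
    by_cases hp : p a
    · simp only [List.takeWhile_cons, hp, if_true, List.length_cons] at h ⊢
      simpa using ih (by omega)
    · simp only [List.takeWhile_cons, hp] at h ⊢
      simp [List.length_nil, hp]

lemma le_takeWhile_length {α : Type} (l : List α) (p : α → Bool) (m : Nat)
    (hm : m ≤ l.length) (h : ∀ k (hk : k < m), p (l[k]'(lt_of_lt_of_le hk hm)) = true) :
    m ≤ (l.takeWhile p).length := by
  by_contra hlt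
  push_neg at hlt
  have hb := takeWhile_boundary l p (lt_of_lt_of_le hlt hm)
  have := h (l.takeWhile p).length hlt
  rw [this] at hb
  cases hb

lemma take_takeWhile_len {α : Type} (l : List α) (p : α → Bool) :
    l.take (l.takeWhile p).length = l.takeWhile p := by
  have h := List.take_left' (l₁ := l.takeWhile p) (l₂ := l.dropWhile p)
    (i := (l.takeWhile p).length) rfl
  rwa [List.takeWhile_append_dropWhile] at h

lemma drop_takeWhile_len {α : Type} (l : List α) (p : α → Bool) :
    l.drop (l.takeWhile p).length = l.dropWhile p := by
  have h := List.drop_left' (l₁ := l.takeWhile p) (l₂ := l.dropWhile p)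
    (i := (l.takeWhile p).length) rfl
  rwa [List.takeWhile_append_dropWhile] at h

-- the hand-written binary search returns the number of keys < x on a key-sorted front
lemma bisect_loop (front : List (Int × Int)) (x : Int)
    (hs : front.Pairwise (fun p q => p.1 < q.1)) :
    ∀ (fuel : Nat) (lo hi : Int), (hi - lo).toNat ≤ fuel → 0 ≤ lo → lo ≤ hi →
    hi ≤ (front.length : Int) →
    (∀ k : Nat, k < lo.toNat → ∀ hk : k < front.length, front[k].1 < x) →
    (∀ k : Nat, hi.toNat ≤ k → ∀ hk : k < front.length, ¬ front[k].1 < x) →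
    bisectF front x lo hi = ((front.takeWhile (fun p => decide (p.1 < x))).length : Int) := by
  have hsg := List.pairwise_iff_getElem.mp hs
  intro fuel
  induction fuel with
  | zero =>
    intro lo hi hfuel h0 hlh hhn hinv1 hinv2
    have hlo : lo = hi := by omega
    subst hlo
    rw [bisectF]
    simp only [lt_irrefl, dite_false]
    have hTle : lo.toNat ≤ (front.takeWhile (fun p => decide (p.1 < x))).length :=
      le_takeWhile_length front _ lo.toNat (by omega)
        (fun k hk => by simp [hinv1 k hk (by omega)])
    have hTge : (front.takeWhile (fun p => decide (p.1 < x))).length ≤ lo.toNat := by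
      by_contra hgt
      push_neg at hgt
      have hlen : lo.toNat < front.length :=
        lt_of_lt_of_le hgt (takeWhile_len_le front _)
      have := takeWhile_prop_of_lt front _ lo.toNat hgt hlen
      simp only [decide_eq_true_eq] at this
      exact hinv2 lo.toNat (le_refl _) hlen this
    omega
  | succ fuel ih =>
    intro lo hi hfuel h0 hlh hhn hinv1 hinv2
    rw [bisectF]
    by_cases hlt : lo < hi
    · rw [dif_pos hlt]
      show (if (PySem.List.pyGetD front (PySem.Int.floordiv (lo + hi) 2) (0, 0)).1 < x then
          bisectF front x (PySem.Int.floordiv (lo + hi) 2 + 1) hi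
        else bisectF front x lo (PySem.Int.floordiv (lo + hi) 2)) = _
      have hmid := PySem.Int.floordiv_two_mid_bounds (le_of_lt hlt)
      have hmidlt : PySem.Int.floordiv (lo + hi) 2 < hi :=
        (PySem.Int.floordiv_lt_iff_lt_mul (by norm_num)).mpr (by omega)
      set mid := PySem.Int.floordiv (lo + hi) 2 with hmiddef
      have hmn : mid < (front.length : Int) := by omega
      have hm0 : 0 ≤ mid := by omega
      rw [PySem.List.pyGetD_eq_getElem front (0, 0) hm0 hmn]
      by_cases hcmp : front[mid.toNat].1 < x
      · rw [if_pos hcmp]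
        refine ih (mid + 1) hi (by omega) (by omega) (by omega) hhn ?_ hinv2
        intro k hk hklen
        rcases Nat.lt_or_ge k mid.toNat with h | h
        · exact lt_trans (hsg k mid.toNat hklen (by omega) h) hcmp
        · have : k = mid.toNat := by omega
          subst this
          exact hcmp
      · rw [if_neg hcmp]
        refine ih lo mid (by omega) h0 (by omega) (by omega) hinv1 ?_
        intro k hk hklen
        rcases Nat.lt_or_ge mid.toNat k with h | h
        · intro hx
          exact hcmp (lt_trans (hsg mid.toNat k (by omega) hklen h) hx)
        · have : k = mid.toNat := by omega
          subst this
          exact hcmp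
    · rw [dif_neg hlt]
      have hlo : lo = hi := by omega
      subst hlo
      have hTle : lo.toNat ≤ (front.takeWhile (fun p => decide (p.1 < x))).length :=
        le_takeWhile_length front _ lo.toNat (by omega)
          (fun k hk => by simp [hinv1 k hk (by omega)])
      have hTge : (front.takeWhile (fun p => decide (p.1 < x))).length ≤ lo.toNat := by
        by_contra hgt
        push_neg at hgt
        have hlen : lo.toNat < front.length :=
          lt_of_lt_of_le hgt (takeWhile_len_le front _)
        have := takeWhile_prop_of_lt front _ lo.toNat hgt hlen
        simp only [decide_eq_true_eq] at this
        exact hinv2 lo.toNat (le_refl _) hlen this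
      omega

lemma bisect_run (front : List (Int × Int)) (x : Int)
    (hs : front.Pairwise (fun p q => p.1 < q.1)) :
    bisectF front x 0 (PySem.List.len front)
      = ((front.takeWhile (fun p => decide (p.1 < x))).length : Int) := by
  rw [PySem.List.len_eq]
  refine bisect_loop front x hs (front.length + 1) 0 (front.length : Int) (by omega) le_rfl
    (by omega) le_rfl (by omega) ?_
  intro k hk hklen
  omega

-- the pop loop lands just past the prefix of pairs dominated by b
lemma popScan_eq (front : List (Int × Int)) (b : Int) :
    ∀ (fuel : Nat) (j : Int), ((front.length : Int) - j).toNat ≤ fuel → 0 ≤ j →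
    j ≤ (front.length : Int) →
    popScan front b j (front.length : Int)
      = j + (((front.drop j.toNat).takeWhile (fun q => decide (b ≤ q.2))).length : Int) := by
  intro fuel
  induction fuel with
  | zero =>
    intro j hfuel h0 hle
    have : j = (front.length : Int) := by omega
    subst this
    rw [popScan]
    simp [List.drop_of_length_le (by omega : front.length ≤ (front.length : Int).toNat)]
  | succ fuel ih =>
    intro j hfuel h0 hle
    rw [popScan]
    by_cases hj : j < (front.length : Int)
    · rw [dif_pos hj]
      have hjlen : j.toNat < front.length := by omega
      rw [PySem.List.pyGetD_eq_getElem front (0, 0) h0 (by omega)]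
      have hdrop : front.drop j.toNat = front[j.toNat] :: front.drop (j.toNat + 1) :=
        List.drop_eq_getElem_cons hjlen
      by_cases hb : b ≤ front[j.toNat].2
      · rw [if_pos hb, ih (j + 1) (by omega) (by omega) (by omega)]
        rw [hdrop, List.takeWhile_cons]
        simp only [hb, decide_true, if_true, List.length_cons]
        have : (j + 1).toNat = j.toNat + 1 := by omega
        rw [this]
        push_cast
        ring
      · rw [if_neg hb]
        rw [hdrop, List.takeWhile_cons]
        simp only [decide_eq_true_eq, hb, if_false]
        simp
    · rw [dif_neg hj]
      have : j = (front.length : Int) := by omega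
      subst this
      simp [List.drop_of_length_le (by omega : front.length ≤ (front.length : Int).toNat)]

-- mfront is none when nothing qualifies
lemma mfront_none_of (fr : List (Int × Int)) (x : Int) (h : ∀ q ∈ fr, ¬ q.1 < x) :
    mfront fr x = none := by
  induction fr with
  | nil => rfl
  | cons p l ih =>
    rw [mfront_cons, ih (fun q hq => h q (List.mem_cons_of_mem p hq))]
    have : contrib x p = none := by simp [contrib, h p List.mem_cons_self]
    rw [this, omin_none_right]

-- on a Good front the query minimum is the last pair with key < x
lemma mfront_eq_getLast (fr : List (Int × Int)) (hG : Good fr) (x : Int) :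
    mfront fr x = ((fr.takeWhile (fun p => decide (p.1 < x))).getLast?).map Prod.snd := by
  induction fr with
  | nil => rfl
  | cons p l ih =>
    obtain ⟨hp, hl⟩ := List.pairwise_cons.mp hG
    rw [mfront_cons, List.takeWhile_cons]
    by_cases hpx : p.1 < x
    · simp only [hpx, decide_true, if_true]
      have hc : contrib x p = some p.2 := by simp [contrib, hpx]
      rw [hc, ih hl]
      cases htw : l.takeWhile (fun p => decide (p.1 < x)) with
      | nil => simp [omin_none_right]
      | cons q t =>
        have hlast : (q :: t).getLast? = some ((q :: t).getLast (by simp)) :=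
          List.getLast?_eq_getLast _
        have hmem : (q :: t).getLast (by simp) ∈ l := by
          have h1 : (q :: t).getLast (by simp) ∈ q :: t := List.getLast_mem _
          have h2 : (q :: t).getLast (by simp) ∈ l.takeWhile (fun p => decide (p.1 < x)) := by
            rw [htw]; exact h1
          exact (List.takeWhile_sublist _).subset h2
        have hlt : ((q :: t).getLast (by simp)).2 < p.2 := (hp _ hmem).2
        rw [List.getLast?_cons_cons, hlast]
        simp only [Option.map_some]
        have : omin (some p.2) (some ((q :: t).getLast (by simp)).2)
            = some ((q :: t).getLast (by simp)).2 := by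
          simp [omin, oltO, hlt]
        rw [this]
    · simp only [hpx, decide_false, if_false]
      have hc : contrib x p = none := by simp [contrib, hpx]
      have hnone : mfront l x = none := by
        refine mfront_none_of l x ?_
        intro q hq hqx
        exact hpx (lt_trans (hp q hq).1 hqx)
      rw [hc, hnone]
      rfl

-- port query = model query on a Good front
lemma qfront_eq_mfront (fr : List (Int × Int)) (hG : Good fr) (x : Int) :
    qfront fr x = mfront fr x := by
  have hs : fr.Pairwise (fun p q : Int × Int => p.1 < q.1) :=
    hG.imp (fun h => h.1)
  show (if 0 < bisectF fr x 0 (PySem.List.len fr) then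
      some (PySem.List.pyGetD fr (bisectF fr x 0 (PySem.List.len fr) - 1) (0, 0)).2
    else none) = _
  rw [bisect_run fr x hs, mfront_eq_getLast fr hG x]
  set T := (fr.takeWhile (fun p => decide (p.1 < x))).length with hT
  have hTle : T ≤ fr.length := takeWhile_len_le fr _
  by_cases h0 : 0 < (T : Int)
  · rw [if_pos h0]
    rw [PySem.List.pyGetD_eq_getElem fr (0, 0) (by omega) (by omega)]
    have hidx : ((T : Int) - 1).toNat = T - 1 := by omega
    rw [List.getLast?_eq_getElem?]
    rw [List.getElem?_eq_getElem (by rw [← hT]; omega)]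
    have hpre : (fr.takeWhile (fun p => decide (p.1 < x)))[T - 1]'(by omega)
        = fr[T - 1]'(by omega) :=
      (List.takeWhile_prefix _).getElem (by omega)
    rw [hpre]
    simp only [Option.map_some]
    congr 1
    exact congrArg Prod.snd (getElem_congr rfl hidx (by omega))
  · rw [if_neg h0]
    have : T = 0 := by omega
    rw [List.length_eq_zero_iff] at this
    rw [this]
    rfl

-- insRec leaves a Good front unchanged when (a, b) is dominated
lemma insRec_unchanged (fr : List (Int × Int)) (a b : Int) (hG : Good fr)
    (h : ∃ q ∈ fr, (q.1 < a ∨ q.1 = a) ∧ q.2 ≤ b) : insRec fr a b = fr := by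
  induction fr with
  | nil => obtain ⟨q, hq, _⟩ := h; cases hq
  | cons p rest ih =>
    obtain ⟨hp, hrest⟩ := List.pairwise_cons.mp hG
    obtain ⟨q, hq, hq1, hq2⟩ := h
    rw [insRec]
    split_ifs with h1 h2 h3
    · rfl
    · rcases List.mem_cons.mp hq with h' | h'
      · subst h'
        rcases hq1 with h'' | h'' <;> omega
      · rw [ih hrest ⟨q, h', hq1, hq2⟩]
    · rfl
    · exfalso
      rcases List.mem_cons.mp hq with h' | h'
      · subst h'
        rcases hq1 with h'' | h''
        · omega
        · exact h3 ⟨h'', hq2⟩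
      · have := (hp q h').1
        rcases hq1 with h'' | h'' <;> omega

-- insRec on a Good front with no dominating pair splices (a, b) into place
lemma insRec_splice (fr : List (Int × Int)) (a b : Int) (hG : Good fr)
    (hnd : ∀ q ∈ fr, q.1 < a → ¬ q.2 ≤ b) (hne : ∀ q ∈ fr, q.1 = a → ¬ q.2 ≤ b) :
    insRec fr a b = fr.takeWhile (fun q => decide (q.1 < a))
      ++ (a, b) :: (fr.dropWhile (fun q => decide (q.1 < a))).dropWhile
          (fun q => decide (b ≤ q.2)) := by
  induction fr with
  | nil => rfl
  | cons p rest ih =>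
    obtain ⟨hp, hrest⟩ := List.pairwise_cons.mp hG
    by_cases h1 : p.1 < a
    · have hb : ¬ p.2 ≤ b := hnd p List.mem_cons_self h1
      rw [insRec, if_pos h1, if_neg hb,
        ih hrest (fun q hq => hnd q (List.mem_cons_of_mem p hq))
          (fun q hq => hne q (List.mem_cons_of_mem p hq))]
      simp [List.takeWhile_cons, List.dropWhile_cons, h1]
    · have h3 : ¬ (p.1 = a ∧ p.2 ≤ b) := fun hh => hne p List.mem_cons_self hh.1 hh.2
      rw [insRec, if_neg h1, if_neg h3]
      simp [List.takeWhile_cons, List.dropWhile_cons, h1]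

-- the port's insert equals the recursive model on a Good front
lemma ins_eq_insRec (fr : List (Int × Int)) (a b : Int) (hG : Good fr) :
    insFront fr a b = insRec fr a b := by
  have hs : fr.Pairwise (fun p q : Int × Int => p.1 < q.1) := hG.imp (fun h => h.1)
  have hsg := List.pairwise_iff_getElem.mp hs
  have hGg := List.pairwise_iff_getElem.mp hG
  show (if 0 < bisectF fr a 0 (PySem.List.len fr) ∧
        (PySem.List.pyGetD fr (bisectF fr a 0 (PySem.List.len fr) - 1) (0, 0)).2 ≤ b then fr
      else if bisectF fr a 0 (PySem.List.len fr) < PySem.List.len fr ∧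
          (PySem.List.pyGetD fr (bisectF fr a 0 (PySem.List.len fr)) (0, 0)).1 = a ∧
          (PySem.List.pyGetD fr (bisectF fr a 0 (PySem.List.len fr)) (0, 0)).2 ≤ b then fr
      else PySem.List.slice fr none (some (bisectF fr a 0 (PySem.List.len fr)))
        ++ (a, b) :: PySem.List.slice fr
          (some (popScan fr b (bisectF fr a 0 (PySem.List.len fr)) (PySem.List.len fr))) none)
    = insRec fr a b
  rw [bisect_run fr a hs, PySem.List.len_eq]
  generalize hT : (fr.takeWhile (fun q : Int × Int => decide (q.1 < a))).length = T
  have hTle : T ≤ fr.length := by rw [← hT]; exact takeWhile_len_le _ _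
  have hbelow : ∀ k, k < T → ∀ hk2 : k < fr.length, fr[k].1 < a := by
    intro k hk hk2
    have h2 := takeWhile_prop_of_lt fr (fun q : Int × Int => decide (q.1 < a)) k
      (by rw [hT]; exact hk) hk2
    simpa using h2
  have hbound : ∀ h2 : T < fr.length, ¬ fr[T].1 < a := by
    intro h2 hcon
    have h3 := takeWhile_boundary fr (fun q : Int × Int => decide (q.1 < a))
      (by rw [hT]; exact h2)
    have h4 : fr[(fr.takeWhile (fun q : Int × Int => decide (q.1 < a))).length]'(by rw [hT]; exact h2)
        = fr[T] := getElem_congr rfl hT (by rw [hT]; exact h2)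
    rw [h4] at h3
    simp only [decide_eq_false_iff_not] at h3
    exact h3 hcon
  have hidx_lt : ∀ q ∈ fr, q.1 < a → ∃ k, ∃ hk : k < fr.length, k < T ∧ fr[k] = q := by
    intro q hq hqa
    obtain ⟨k, hk, hkq⟩ := List.mem_iff_getElem.mp hq
    refine ⟨k, hk, ?_, hkq⟩
    by_contra hge
    push_neg at hge
    have hTlen : T < fr.length := lt_of_le_of_lt hge hk
    rcases Nat.lt_or_ge T k with h' | h'
    · exact hbound hTlen (lt_trans (hsg T k hTlen hk h') (by rw [hkq]; exact hqa))
    · have hkT : k = T := by omega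
      subst hkT
      exact hbound hTlen (by rw [hkq]; exact hqa)
  have hidx_eq : ∀ q ∈ fr, q.1 = a → ∃ hk : T < fr.length, fr[T] = q := by
    intro q hq hqa
    obtain ⟨k, hk, hkq⟩ := List.mem_iff_getElem.mp hq
    have hge : T ≤ k := by
      by_contra hlt
      push_neg at hlt
      have := hbelow k hlt hk
      rw [hkq] at this
      omega
    have hkT : k = T := by
      rcases Nat.lt_or_ge T k with h' | h'
      · exfalso
        have hTlen : T < fr.length := by omega
        refine hbound hTlen ?_
        have := hsg T k hTlen hk h'
        rw [hkq] at this
        omega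
      · omega
    subst hkT
    exact ⟨hk, hkq⟩
  by_cases hc1 : 0 < (T : Int) ∧ (PySem.List.pyGetD fr ((T : Int) - 1) (0, 0)).2 ≤ b
  · rw [if_pos hc1]
    have hT0 : 0 < T := by exact_mod_cast hc1.1
    have hget1 : PySem.List.pyGetD fr ((T : Int) - 1) (0, 0) = fr[T - 1]'(by omega) := by
      rw [PySem.List.pyGetD_eq_getElem fr (0, 0) (by omega) (by omega)]
      exact getElem_congr rfl (by omega) (by omega)
    refine (insRec_unchanged fr a b hG ⟨fr[T - 1]'(by omega), List.getElem_mem _,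
      Or.inl (hbelow (T - 1) (by omega) (by omega)), ?_⟩).symm
    rw [← hget1]
    exact hc1.2
  · rw [if_neg hc1]
    by_cases hc2 : (T : Int) < (fr.length : Int) ∧
        (PySem.List.pyGetD fr (T : Int) (0, 0)).1 = a ∧ (PySem.List.pyGetD fr (T : Int) (0, 0)).2 ≤ b
    · rw [if_pos hc2]
      have hTlen : T < fr.length := by exact_mod_cast hc2.1
      have hget2 : PySem.List.pyGetD fr (T : Int) (0, 0) = fr[T] := by
        rw [PySem.List.pyGetD_eq_getElem fr (0, 0) (by omega) (by omega)]
        exact getElem_congr rfl (by omega) (by omega)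
      rw [hget2] at hc2
      exact (insRec_unchanged fr a b hG ⟨fr[T], List.getElem_mem _,
        Or.inr hc2.2.1, hc2.2.2⟩).symm
    · rw [if_neg hc2]
      have hnd : ∀ q ∈ fr, q.1 < a → ¬ q.2 ≤ b := by
        intro q hq hqa hqb
        obtain ⟨k, hk, hkT, hkq⟩ := hidx_lt q hq hqa
        have hT0 : 0 < T := by omega
        have hget1 : PySem.List.pyGetD fr ((T : Int) - 1) (0, 0) = fr[T - 1]'(by omega) := by
          rw [PySem.List.pyGetD_eq_getElem fr (0, 0) (by omega) (by omega)]
          exact getElem_congr rfl (by omega) (by omega)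
        refine hc1 ⟨by exact_mod_cast hT0, ?_⟩
        rw [hget1]
        rcases Nat.lt_or_ge k (T - 1) with h' | h'
        · have hlt := (hGg k (T - 1) hk (by omega) h').2
          rw [hkq] at hlt
          omega
        · have hkT1 : k = T - 1 := by omega
          subst hkT1
          rw [hkq]
          exact hqb
      have hne : ∀ q ∈ fr, q.1 = a → ¬ q.2 ≤ b := by
        intro q hq hqa hqb
        obtain ⟨hTlen, hkq⟩ := hidx_eq q hq hqa
        have hget2 : PySem.List.pyGetD fr (T : Int) (0, 0) = fr[T] := by
          rw [PySem.List.pyGetD_eq_getElem fr (0, 0) (by omega) (by omega)]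
          exact getElem_congr rfl (by omega) (by omega)
        exact hc2 ⟨by omega, by rw [hget2, hkq]; exact hqa,
          by rw [hget2, hkq]; exact hqb⟩
      rw [insRec_splice fr a b hG hnd hne]
      rw [popScan_eq fr b (fr.length + 1) (T : Int) (by omega) (by omega) (by omega)]
      rw [PySem.List.slice_to fr (by omega : (0 : Int) ≤ (T : Int))]
      rw [PySem.List.slice_from fr (by positivity)]
      have e1 : ((T : Int)).toNat = T := Int.toNat_natCast T
      rw [e1]
      have e2 : ((T : Int) + (((fr.drop T).takeWhile (fun q => decide (b ≤ q.2))).length : Int)).toNat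
          = T + ((fr.drop T).takeWhile (fun q => decide (b ≤ q.2))).length := by omega
      rw [e2]
      rw [← hT, take_takeWhile_len, ← List.drop_drop, drop_takeWhile_len,
        drop_takeWhile_len]

-- list of successive queries: scanQ S l = [mfront S l₀.1, mfront (S++[l₀]) l₁.1, …]
def scanQ (S : List (Int × Int)) : List (Int × Int) → List (Option Int)
  | [] => []
  | p :: l => mfront S p.1 :: scanQ (S ++ [p]) l

lemma length_scanQ (S l : List (Int × Int)) : (scanQ S l).length = l.length := by
  induction l generalizing S with
  | nil => rfl
  | cons p l ih => simp [scanQ, ih]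

lemma scanQ_getElem (S l : List (Int × Int)) (k : Nat) (hk : k < l.length) :
    (scanQ S l)[k]'(by rw [length_scanQ]; exact hk) = mfront (S ++ l.take k) (l[k].1) := by
  induction l generalizing S k with
  | nil => simp at hk
  | cons p l ih =>
    cases k with
    | zero => simp [scanQ]
    | succ k =>
      have hk' : k < l.length := by simpa using hk
      simp only [scanQ, List.getElem_cons_succ, List.take_succ_cons]
      rw [ih (S ++ [p]) k hk']
      simp

-- the query/insert pass computes scanQ
lemma pass_fold (l : List (Int × Int)) (S fr : List (Int × Int))
    (acc : List (Option Int)) (hG : Good fr) (hq : ∀ x, mfront fr x = mfront S x) :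
    (l.foldl (fun s p => (s.1 ++ [qfront s.2 p.1], insFront s.2 p.1 p.2)) (acc, fr)).1
      = acc ++ scanQ S l := by
  induction l generalizing S fr acc with
  | nil => simp [scanQ]
  | cons p l ih =>
    simp only [List.foldl_cons]
    rw [qfront_eq_mfront fr hG p.1, ins_eq_insRec fr p.1 p.2 hG]
    rw [ih (S ++ [p]) (insRec fr p.1 p.2) (acc ++ [mfront fr p.1])
      (ins_good fr p.1 p.2 hG)
      (fun x => by rw [ins_qf fr p.1 p.2 hG x, hq x, mfront_append, mfront_singleton])]
    simp [scanQ, hq p.1]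

-- an index fold over range(a,b) reading A[j], B[j] is a fold over a slice of A.zip B
lemma map_h_range (A B : List Int) (a b : Int) (h0 : 0 ≤ a) (hab : a ≤ b)
    (hbA : b.toNat ≤ A.length) (hbB : b.toNat ≤ B.length) :
    (PySem.List.pyRange a b 1).map
        (fun j => (PySem.List.pyGetD A j 0, PySem.List.pyGetD B j 0))
      = ((A.zip B).drop a.toNat).take (b.toNat - a.toNat) := by
  have hZ : (A.zip B).length = min A.length B.length := List.length_zip
  apply List.ext_getElem
  · simp only [List.length_map, PySem.List.length_pyRange_one, List.length_take,
      List.length_drop, hZ]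
    omega
  · intro k h1 h2
    simp only [List.length_map, PySem.List.length_pyRange_one] at h1
    rw [List.getElem_map, PySem.List.getElem_pyRange_one]
    rw [List.getElem_take, List.getElem_drop, List.getElem_zip]
    have hk1 : (0:Int) ≤ a + k := by omega
    have hk2 : a + k < (A.length : Int) := by omega
    have hk3 : a + k < (B.length : Int) := by omega
    rw [PySem.List.pyGetD_eq_getElem A 0 hk1 hk2, PySem.List.pyGetD_eq_getElem B 0 hk1 hk3]
    have hidx : (a + k).toNat = a.toNat + k := by omega
    exact Prod.ext (getElem_congr rfl hidx (by omega)) (getElem_congr rfl hidx (by omega))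

lemma mfront_map_neg (l : List (Int × Int)) (x : Int) :
    mfront (l.map (fun p => (-p.1, p.2))) (-x)
      = l.foldl (fun res p => if x < p.1 ∧ oltO (some p.2) res then some p.2 else res) none := by
  show List.foldl _ none (l.map fun p => (-p.1, p.2)) = _
  rw [List.foldl_map]
  refine PySem.List.foldl_congr_mem _ _ _ _ ?_
  intro acc p hp
  simp only [neg_lt_neg_iff]

-- ===== VERDICT (by name: the statement is the Claim_ definition above) =====
theorem christ_spec : Claim_equal_christ := by
  intro A B hDom hPre
  unfold Spec_christ
  by_cases h3 : PySem.List.len A < 3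
  · simp only [christ, christ_alt]
    rw [if_pos h3, if_pos h3]
  · simp only [christ, christ_alt]
    rw [if_neg h3, if_neg h3]
    have hlenA : PySem.List.len A = (A.length : Int) := PySem.List.len_eq A
    have hlen3 : 3 ≤ A.length := by rw [hlenA] at h3; omega
    have hAB : A.length ≤ B.length := by
      rcases hPre with h | h
      · omega
      · exact h
    have hZlen : (A.zip B).length = A.length := by rw [List.length_zip]; omega
    -- the full index range maps to A.zip B
    have hmapfull : (PySem.List.pyRange 0 (PySem.List.len A) 1).map
        (fun j => (PySem.List.pyGetD A j 0, PySem.List.pyGetD B j 0)) = A.zip B := by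
      rw [map_h_range A B 0 (PySem.List.len A) le_rfl (by rw [hlenA]; positivity)
        (by rw [hlenA]; simp) (by rw [hlenA]; simpa using hAB)]
      simp only [Int.toNat_zero, List.drop_zero, Nat.sub_zero, hlenA, Int.toNat_natCast]
      rw [← hZlen, List.take_length]
    -- left pass computes scanQ [] (A.zip B)
    have hlefts : ((PySem.List.pyRange 0 (PySem.List.len A) 1).foldl (fun s i =>
          (s.1 ++ [qfront s.2 (PySem.List.pyGetD A i 0)],
           insFront s.2 (PySem.List.pyGetD A i 0) (PySem.List.pyGetD B i 0)))
          (([] : List (Option Int)), ([] : List (Int × Int)))).1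
        = scanQ [] (A.zip B) := by
      calc ((PySem.List.pyRange 0 (PySem.List.len A) 1).foldl (fun s i =>
          (s.1 ++ [qfront s.2 (PySem.List.pyGetD A i 0)],
           insFront s.2 (PySem.List.pyGetD A i 0) (PySem.List.pyGetD B i 0)))
          (([] : List (Option Int)), ([] : List (Int × Int)))).1
          = (((PySem.List.pyRange 0 (PySem.List.len A) 1).map
              (fun j => (PySem.List.pyGetD A j 0, PySem.List.pyGetD B j 0))).foldl
              (fun s (p : Int × Int) => (s.1 ++ [qfront s.2 p.1], insFront s.2 p.1 p.2))
              (([] : List (Option Int)), ([] : List (Int × Int)))).1 :=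
            congrArg Prod.fst (List.foldl_map
              (f := fun j => (PySem.List.pyGetD A j 0, PySem.List.pyGetD B j 0))
              (g := fun s (p : Int × Int) =>
                (s.1 ++ [qfront s.2 p.1], insFront s.2 p.1 p.2))).symm
        _ = scanQ [] (A.zip B) := by
            rw [hmapfull]
            exact (pass_fold (A.zip B) [] [] [] List.Pairwise.nil (fun _ => rfl)).trans
              (List.nil_append _)
    -- the backward range is the reversed forward range
    have hrange_rev : PySem.List.pyRange (PySem.List.len A - 1) (-1) (-1)
        = (PySem.List.pyRange 0 (PySem.List.len A) 1).reverse := by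
      rw [PySem.List.pyRange_neg_one_eq_reverse]
      norm_num
    have hmapneg : (PySem.List.pyRange 0 (PySem.List.len A) 1).map
        (fun j => (-PySem.List.pyGetD A j 0, PySem.List.pyGetD B j 0))
        = (A.zip B).map (fun p => (-p.1, p.2)) := by
      rw [← hmapfull, List.map_map]
      rfl
    -- right pass computes scanQ [] of the reversed negated zip
    have hrights : ((PySem.List.pyRange (PySem.List.len A - 1) (-1) (-1)).foldl (fun s i =>
          (s.1 ++ [qfront s.2 (-PySem.List.pyGetD A i 0)],
           insFront s.2 (-PySem.List.pyGetD A i 0) (PySem.List.pyGetD B i 0)))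
          (([] : List (Option Int)), ([] : List (Int × Int)))).1
        = scanQ [] (((A.zip B).map (fun p => (-p.1, p.2))).reverse) := by
      calc ((PySem.List.pyRange (PySem.List.len A - 1) (-1) (-1)).foldl (fun s i =>
          (s.1 ++ [qfront s.2 (-PySem.List.pyGetD A i 0)],
           insFront s.2 (-PySem.List.pyGetD A i 0) (PySem.List.pyGetD B i 0)))
          (([] : List (Option Int)), ([] : List (Int × Int)))).1
          = (((PySem.List.pyRange (PySem.List.len A - 1) (-1) (-1)).map
              (fun j => (-PySem.List.pyGetD A j 0, PySem.List.pyGetD B j 0))).foldl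
              (fun s (p : Int × Int) => (s.1 ++ [qfront s.2 p.1], insFront s.2 p.1 p.2))
              (([] : List (Option Int)), ([] : List (Int × Int)))).1 :=
            congrArg Prod.fst (List.foldl_map
              (f := fun j => (-PySem.List.pyGetD A j 0, PySem.List.pyGetD B j 0))
              (g := fun s (p : Int × Int) =>
                (s.1 ++ [qfront s.2 p.1], insFront s.2 p.1 p.2))).symm
        _ = scanQ [] (((A.zip B).map (fun p => (-p.1, p.2))).reverse) := by
            rw [hrange_rev, List.map_reverse, hmapneg]
            exact (pass_fold _ [] [] [] List.Pairwise.nil (fun _ => rfl)).trans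
              (List.nil_append _)
    rw [hlefts, hrights]
    refine congrArg (fun o : Option Int => (match o with | none => (-1 : Int) | some v => v)) ?_
    refine PySem.List.foldl_congr_mem _ _ _ _ ?_
    intro acc i hi
    obtain ⟨hi1, hi2⟩ := PySem.List.mem_pyRange_one.mp hi
    rw [hlenA] at hi2
    have hi0 : (0:Int) ≤ i := by omega
    have hiA : i < (A.length : Int) := by omega
    have htlt : i.toNat + 1 < A.length := by omega
    -- A's inner left loop = mfront of the zip prefix
    have hLA : (PySem.List.pyRange 0 i 1).foldl (fun lm j =>
          if PySem.List.pyGetD A j 0 < PySem.List.pyGetD A i 0 ∧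
              oltO (some (PySem.List.pyGetD B j 0)) lm
          then some (PySem.List.pyGetD B j 0) else lm) none
        = mfront ((A.zip B).take i.toNat) (PySem.List.pyGetD A i 0) := by
      calc (PySem.List.pyRange 0 i 1).foldl (fun lm j =>
          if PySem.List.pyGetD A j 0 < PySem.List.pyGetD A i 0 ∧
              oltO (some (PySem.List.pyGetD B j 0)) lm
          then some (PySem.List.pyGetD B j 0) else lm) none
          = ((PySem.List.pyRange 0 i 1).map
              (fun j => (PySem.List.pyGetD A j 0, PySem.List.pyGetD B j 0))).foldl
              (fun lm (p : Int × Int) =>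
                if p.1 < PySem.List.pyGetD A i 0 ∧ oltO (some p.2) lm
                then some p.2 else lm) none :=
            (List.foldl_map
              (f := fun j => (PySem.List.pyGetD A j 0, PySem.List.pyGetD B j 0))
              (g := fun lm (p : Int × Int) =>
                if p.1 < PySem.List.pyGetD A i 0 ∧ oltO (some p.2) lm
                then some p.2 else lm)).symm
        _ = mfront ((A.zip B).take i.toNat) (PySem.List.pyGetD A i 0) := by
            rw [map_h_range A B 0 i le_rfl hi0 (by omega) (by omega)]
            simp only [Int.toNat_zero, List.drop_zero, Nat.sub_zero]
            rfl
    -- A's inner right loop = mfront of the negated zip suffix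
    have hRA : (PySem.List.pyRange (i + 1) (PySem.List.len A) 1).foldl (fun rm k =>
          if PySem.List.pyGetD A i 0 < PySem.List.pyGetD A k 0 ∧
              oltO (some (PySem.List.pyGetD B k 0)) rm
          then some (PySem.List.pyGetD B k 0) else rm) none
        = mfront (((A.zip B).map (fun p => (-p.1, p.2))).drop (i.toNat + 1))
            (-PySem.List.pyGetD A i 0) := by
      calc (PySem.List.pyRange (i + 1) (PySem.List.len A) 1).foldl (fun rm k =>
          if PySem.List.pyGetD A i 0 < PySem.List.pyGetD A k 0 ∧
              oltO (some (PySem.List.pyGetD B k 0)) rm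
          then some (PySem.List.pyGetD B k 0) else rm) none
          = ((PySem.List.pyRange (i + 1) (PySem.List.len A) 1).map
              (fun j => (PySem.List.pyGetD A j 0, PySem.List.pyGetD B j 0))).foldl
              (fun rm (p : Int × Int) =>
                if PySem.List.pyGetD A i 0 < p.1 ∧ oltO (some p.2) rm
                then some p.2 else rm) none :=
            (List.foldl_map
              (f := fun j => (PySem.List.pyGetD A j 0, PySem.List.pyGetD B j 0))
              (g := fun rm (p : Int × Int) =>
                if PySem.List.pyGetD A i 0 < p.1 ∧ oltO (some p.2) rm
                then some p.2 else rm)).symm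
        _ = ((A.zip B).drop (i.toNat + 1)).foldl
              (fun rm (p : Int × Int) =>
                if PySem.List.pyGetD A i 0 < p.1 ∧ oltO (some p.2) rm
                then some p.2 else rm) none := by
            rw [map_h_range A B (i + 1) (PySem.List.len A) (by omega) (by rw [hlenA]; omega)
              (by rw [hlenA]; simp) (by rw [hlenA]; simpa using hAB)]
            have h1 : (i + 1).toNat = i.toNat + 1 := by omega
            have h2 : (PySem.List.len A).toNat = A.length := by rw [hlenA]; simp
            rw [h1, h2, List.take_of_length_le (by rw [List.length_drop, hZlen])]
        _ = mfront (((A.zip B).map (fun p => (-p.1, p.2))).drop (i.toNat + 1))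
              (-PySem.List.pyGetD A i 0) := by
            rw [← List.map_drop]
            exact (mfront_map_neg ((A.zip B).drop (i.toNat + 1)) (PySem.List.pyGetD A i 0)).symm
    -- B's stored left minimum
    have hLB : PySem.List.pyGetD (scanQ [] (A.zip B)) i none
        = mfront ((A.zip B).take i.toNat) (PySem.List.pyGetD A i 0) := by
      rw [PySem.List.pyGetD_eq_getElem (scanQ [] (A.zip B)) none hi0
        (by rw [length_scanQ, hZlen]; exact_mod_cast hiA)]
      rw [scanQ_getElem [] (A.zip B) i.toNat (by rw [hZlen]; omega)]
      rw [List.nil_append]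
      congr 1
      rw [List.getElem_zip, PySem.List.pyGetD_eq_getElem A 0 hi0 hiA]
    -- B's stored right minimum
    have hRB : PySem.List.pyGetD
          ((scanQ [] (((A.zip B).map (fun p => (-p.1, p.2))).reverse)).reverse) i none
        = mfront (((A.zip B).map (fun p => (-p.1, p.2))).drop (i.toNat + 1))
            (-PySem.List.pyGetD A i 0) := by
      have hWlen : (((A.zip B).map (fun p : Int × Int => (-p.1, p.2))).reverse).length
          = A.length := by
        rw [List.length_reverse, List.length_map, hZlen]
      have hRlen : (scanQ [] (((A.zip B).map (fun p : Int × Int => (-p.1, p.2))).reverse)).length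
          = A.length := by rw [length_scanQ, hWlen]
      rw [PySem.List.pyGetD_eq_getElem _ none hi0
        (by rw [List.length_reverse, hRlen]; exact_mod_cast hiA)]
      rw [List.getElem_reverse]
      rw [getElem_congr rfl (show (scanQ [] (((A.zip B).map
            (fun p : Int × Int => (-p.1, p.2))).reverse)).length - 1 - i.toNat
          = A.length - 1 - i.toNat by rw [hRlen]) (by rw [hRlen]; omega)]
      rw [scanQ_getElem [] (((A.zip B).map (fun p : Int × Int => (-p.1, p.2))).reverse)
        (A.length - 1 - i.toNat) (by rw [hWlen]; omega)]
      rw [List.nil_append]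
      have htake : (((A.zip B).map (fun p : Int × Int => (-p.1, p.2))).reverse).take
            (A.length - 1 - i.toNat)
          = (((A.zip B).map (fun p : Int × Int => (-p.1, p.2))).drop (i.toNat + 1)).reverse := by
        rw [List.take_reverse]
        congr 2
        rw [List.length_map, hZlen]
        omega
      rw [htake, mfront_reverse]
      congr 1
      rw [List.getElem_reverse]
      have hidx : (((A.zip B).map (fun p : Int × Int => (-p.1, p.2))).length - 1
          - (A.length - 1 - i.toNat)) = i.toNat := by
        rw [List.length_map, hZlen]; omega
      rw [getElem_congr rfl hidx (by rw [List.length_map, hZlen]; omega)]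
      rw [List.getElem_map, List.getElem_zip]
      rw [PySem.List.pyGetD_eq_getElem A 0 hi0 hiA]
    rw [hLA, hRA, hLB, hRB]
    rfl
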